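-- pv_equiv track=rewrite | github.com/uiuc-kang-lab/text_to_sql_benchmarks | text_to_sql_agents/csc_sql/src/cscsql/utils/sqlite_db_utils.py | aggregate_columns
-- ===== SOURCE A (Python) =====
-- from typing import List, Dict, Tuple, Union, Any, Optional
--
-- def aggregate_columns(columns_dicts: List[Dict[str, Any]], selected_tables: List[str],
--                       merge_cot=True, question_id=None) -> Dict[str, List[str]]:
--     """
--     Aggregates columns from multiple responses and consolidates reasoning.
--
--     Args:
--         columns_dicts (List[Dict[str, Any]]): List of dictionaries containing column names and reasoning.
--         selected_tables (List[str]): List of selected tables.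
--
--     Returns:
--         Dict[str, List[str]]: Aggregated result with unique column names and consolidated reasoning.
--     """
--     question_id_msg = "" if question_id is None else f", question_id: {question_id}"
--     # logger.info(f"Aggregating columns from multiple responses{question_id_msg}")
--     columns = {}
--     chain_of_thoughts = []
--     for column_dict in columns_dicts:
--         valid_column_dict = False
--         dict_cot = None
--         for key, value in column_dict.items():
--             if key == "chain_of_thought_reasoning":
--                 dict_cot = value
--             else:  # key is table name
--                 table_name = key
--                 if table_name.startswith("`"):
--                     table_name = table_name[1:-1]
--                 column_names = value
--                 if table_name.lower() in [t.lower() for t in selected_tables]: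
--                     for column_name in column_names:
--                         if column_name.startswith("`"):
--                             column_name = column_name[1:-1]
--                         if table_name not in columns:
--                             columns[table_name] = []
--                         if column_name.lower() not in [col.lower() for col in columns[table_name]]:
--                             columns[table_name].append(column_name)
--                         valid_column_dict = True
--         if valid_column_dict and dict_cot:
--             chain_of_thoughts.append(dict_cot)
--
--     # logger.info(f"Aggregated columns: {columns}")
--     return columns
-- ===== SOURCE B (Python) =====
-- def aggregate_columns(columns_dicts, selected_tables, merge_cot=True, question_id=None):
--     """Table-major group-by re-implementation: materialize the normalized
--     (table, column) event stream once, list table keys in first-appearance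
--     order, then build the result by extracting each table's columns from the
--     stream and deduplicating with a hash set of lowercased names (first casing
--     wins). The dead chain-of-thought bookkeeping of the original is dropped."""
--     def strip(s):
--         return s[1:-1] if s.startswith("`") else s
--
--     selected = {t.lower() for t in selected_tables}
--     events = []
--     for d in columns_dicts:
--         for k, v in d.items():
--             if k != "chain_of_thought_reasoning":
--                 t = strip(k)
--                 if t.lower() in selected:
--                     events.extend((t, strip(c)) for c in v)
--
--     tables = []
--     for t, _ in events:
--         if t not in tables:
--             tables.append(t)
--
--     def uniq_ci(cols):
--         seen, out = set(), []
--         for c in cols: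
--             if c.lower() not in seen:
--                 seen.add(c.lower())
--                 out.append(c)
--         return out
--
--     return {t: uniq_ci([c for t2, c in events if t2 == t]) for t in tables}
-- ===== Notes on version B (the rewrite author's own statement) =====
-- stated objective: faster
-- what changed: Replaces A's single incremental pass that mutates a result dict per column (rebuilding the lowercased selected_tables list for every key and rescanning a table's current column list for every column, plus dead chain-of-thought bookkeeping) by a table-major group-by: materialize the normalized (table, column) event stream once against a prebuilt lowercase table set, compute the table keys in first-appearance order, then build each table's entry independently by filtering the stream and deduplicating with a hash set of lowercased names; …
import Mathlib
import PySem

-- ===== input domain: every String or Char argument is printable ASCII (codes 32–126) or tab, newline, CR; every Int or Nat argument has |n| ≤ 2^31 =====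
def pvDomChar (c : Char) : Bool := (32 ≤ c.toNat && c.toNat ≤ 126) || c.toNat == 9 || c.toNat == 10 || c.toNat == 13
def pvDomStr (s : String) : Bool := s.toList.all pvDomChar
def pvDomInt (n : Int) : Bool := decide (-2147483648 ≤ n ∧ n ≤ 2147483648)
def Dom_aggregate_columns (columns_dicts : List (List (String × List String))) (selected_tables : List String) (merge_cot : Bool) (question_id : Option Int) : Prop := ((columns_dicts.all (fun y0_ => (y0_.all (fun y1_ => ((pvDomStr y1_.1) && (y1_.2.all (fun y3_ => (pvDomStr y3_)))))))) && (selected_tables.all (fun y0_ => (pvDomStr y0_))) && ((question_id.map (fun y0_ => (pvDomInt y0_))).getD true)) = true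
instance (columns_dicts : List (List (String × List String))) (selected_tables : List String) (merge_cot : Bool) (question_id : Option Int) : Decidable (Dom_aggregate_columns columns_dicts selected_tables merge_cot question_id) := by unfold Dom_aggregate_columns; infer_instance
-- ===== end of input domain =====

-- B replaces A's single incremental dict-mutating pass by a table-major group-by over a
-- materialized event stream with hash-set dedup (objective: faster, measured by the timing
-- run). Return values proved equal on all inputs (A is total).

-- ===== PORT A =====
-- A's innermost loop body: for column_name in column_names (state: columns dict, valid flag)
def pvAStepCol (table_name : String) (st : PySem.Dict String (List String) × Bool) (column_name : String) : PySem.Dict String (List String) × Bool :=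
  let cn := if PySem.Str.startswith column_name "`" then PySem.Str.slice column_name (some 1) (some (-1)) else column_name
  let columns := if st.1.contains table_name then st.1 else st.1.insert table_name []
  let cur := columns.getD table_name []
  let columns := if (cur.map PySem.Str.lower).contains (PySem.Str.lower cn) then columns else columns.insert table_name (cur ++ [cn])
  (columns, true)

-- A's middle loop body: for key, value in column_dict.items() (state: columns, valid, dict_cot)
def pvAStepItem (selected_tables : List String) (st : PySem.Dict String (List String) × Bool × Option (List String)) (kv : String × List String) : PySem.Dict String (List String) × Bool × Option (List String) :=
  if kv.1 == "chain_of_thought_reasoning" then (st.1, st.2.1, some kv.2)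
  else
    let table_name := if PySem.Str.startswith kv.1 "`" then PySem.Str.slice kv.1 (some 1) (some (-1)) else kv.1
    if (selected_tables.map PySem.Str.lower).contains (PySem.Str.lower table_name) then
      let r := kv.2.foldl (pvAStepCol table_name) (st.1, st.2.1)
      (r.1, r.2, st.2.2)
    else (st.1, st.2.1, st.2.2)

-- A's outer loop body: for column_dict in columns_dicts (state: columns, chain_of_thoughts)
def pvAStepDict (selected_tables : List String) (st : PySem.Dict String (List String) × List (List String)) (column_dict : List (String × List String)) : PySem.Dict String (List String) × List (List String) :=
  let inner := (PySem.Dict.ofList column_dict).items.foldl (pvAStepItem selected_tables) (st.1, false, none)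
  let cots := match inner.2.2 with
    | some cot => if inner.2.1 && !cot.isEmpty then st.2 ++ [cot] else st.2
    | none => st.2
  (inner.1, cots)

def aggregate_columns (columns_dicts : List (List (String × List String))) (selected_tables : List String) (merge_cot : Bool) (question_id : Option Int) : List (String × List String) :=
  let _question_id_msg : String := match question_id with
    | none => ""
    | some n => ", question_id: " ++ PySem.Int.toStr n
  (columns_dicts.foldl (pvAStepDict selected_tables) (PySem.Dict.empty, [])).1.items

-- ===== PORT B =====
-- Source B's strip: remove one leading/trailing backtick
def pvStrip (s : String) : String := if PySem.Str.startswith s "`" then PySem.Str.slice s (some 1) (some (-1)) else s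

-- Source B's inner event loop body: one (key, value) item of a dict
def pvEvStepItem (selected : PySem.Set String) (ev : List (String × String)) (kv : String × List String) : List (String × String) :=
  if kv.1 != "chain_of_thought_reasoning" then
    let t := pvStrip kv.1
    if PySem.Set.contains selected (PySem.Str.lower t) then ev ++ kv.2.map (fun c => (t, pvStrip c)) else ev
  else ev

-- Source B's event-collection loops
def pvEvents (columns_dicts : List (List (String × List String))) (selected : PySem.Set String) : List (String × String) :=
  columns_dicts.foldl (fun ev d => (PySem.Dict.ofList d).items.foldl (pvEvStepItem selected) ev) []

-- Source B's table-order pass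
def pvTables (events : List (String × String)) : List String :=
  events.foldl (fun ts p => if ts.contains p.1 then ts else ts ++ [p.1]) []

-- Source B's uniq_ci loop body (state: seen set of lowercased names, output list)
def pvUniqStep (st : PySem.Set String × List String) (c : String) : PySem.Set String × List String :=
  if PySem.Set.contains st.1 (PySem.Str.lower c) then st
  else (PySem.Set.add st.1 (PySem.Str.lower c), st.2 ++ [c])

def pvUniqCI (cols : List String) : List String :=
  (cols.foldl pvUniqStep (PySem.Set.empty, [])).2

def aggregate_columns_alt (columns_dicts : List (List (String × List String))) (selected_tables : List String) (merge_cot : Bool) (question_id : Option Int) : List (String × List String) :=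
  let selected := PySem.Set.ofList (selected_tables.map PySem.Str.lower)
  let events := pvEvents columns_dicts selected
  let tables := pvTables events
  tables.map (fun t => (t, pvUniqCI ((events.filter (fun p => p.1 == t)).map (fun p => p.2))))

-- ===== PRECONDITION & SPEC =====
def Spec_aggregate_columns (columns_dicts : List (List (String × List String))) (selected_tables : List String) (merge_cot : Bool) (question_id : Option Int) (out : List (String × List String)) : Prop := out = aggregate_columns_alt columns_dicts selected_tables merge_cot question_id
instance (columns_dicts : List (List (String × List String))) (selected_tables : List String) (merge_cot : Bool) (question_id : Option Int) (out : List (String × List String)) : Decidable (Spec_aggregate_columns columns_dicts selected_tables merge_cot question_id out) := by unfold Spec_aggregate_columns; infer_instance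

-- ===== CLAIM (what is proved, stated in full; the proofs are below) =====
def Claim_equal_aggregate_columns : Prop := ∀ (columns_dicts : List (List (String × List String))) (selected_tables : List String) (merge_cot : Bool) (question_id : Option Int), Dom_aggregate_columns columns_dicts selected_tables merge_cot question_id → Spec_aggregate_columns columns_dicts selected_tables merge_cot question_id (aggregate_columns columns_dicts selected_tables merge_cot question_id)

-- ===== LEMMAS AND PROOFS =====

-- proof-only intermediate: the step A in effect performs on its result dict per normalized pair
def pvGroupStep (r : PySem.Dict String (List String)) (p : String × String) : PySem.Dict String (List String) :=
  let r := r.setdefault p.1 []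
  let cols := r.getD p.1 []
  if (cols.map PySem.Str.lower).contains (PySem.Str.lower p.2) then r else r.insert p.1 (cols ++ [p.2])

-- proof-only intermediate: the event stream as a flatMap
def pvPairsFlat (columns_dicts : List (List (String × List String))) (sel : List String) : List (String × String) :=
  columns_dicts.flatMap (fun d =>
    (PySem.Dict.ofList d).items.flatMap (fun kv =>
      if kv.1 != "chain_of_thought_reasoning" && PySem.Set.contains (PySem.Set.ofList (sel.map PySem.Str.lower)) (PySem.Str.lower (pvStrip kv.1))
      then kv.2.map (fun cn => (pvStrip kv.1, pvStrip cn))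
      else []))

-- proof-only intermediate: one result entry of B
def pvEntry (ps : List (String × String)) (t : String) : String × List String :=
  (t, pvUniqCI ((ps.filter (fun p => p.1 == t)).map (fun p => p.2)))

theorem pv_set_contains_ofList (l : List String) (x : String) :
    PySem.Set.contains (PySem.Set.ofList l) x = l.contains x := by
  by_cases h : x ∈ l
  · simp [PySem.Set.contains_eq_listContains, h, PySem.Set.mem_ofList]
  · simp [PySem.Set.contains_eq_listContains, h, PySem.Set.mem_ofList]

-- ---- A's folds compute the pvGroupStep fold over the flattened pairs ----

theorem pv_step_eq (t x : String) (c : PySem.Dict String (List String)) (b : Bool) :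
    pvGroupStep c (t, pvStrip x) = (pvAStepCol t (c, b) x).1 := by
  have hsd : c.setdefault t [] = if c.contains t = true then c else c.insert t [] := by
    cases hc : c.contains t with
    | true => simp [PySem.Dict.setdefault, hc]
    | false =>
      simp only [PySem.Dict.setdefault, hc, Bool.false_eq_true, if_false]
      refine (PySem.Dict.ext ?_).symm
      rw [PySem.Dict.items_insert_of_not_contains]
      exact hc
  simp only [pvGroupStep, pvAStepCol, pvStrip, hsd]

theorem pv_colfold (t : String) (v : List String) :
    ∀ (c : PySem.Dict String (List String)) (b : Bool),
      (v.foldl (pvAStepCol t) (c, b)).1 = (v.map (fun cn => (t, pvStrip cn))).foldl pvGroupStep c := by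
  induction v with
  | nil => intro c b; rfl
  | cons x xs ih =>
    intro c b
    simp only [List.foldl_cons, List.map_cons]
    rw [ih]
    congr 1
    exact (pv_step_eq t x c b).symm

theorem pv_itemfold (sel : List String) (items : List (String × List String)) :
    ∀ (c : PySem.Dict String (List String)) (b : Bool) (co : Option (List String)),
      (items.foldl (pvAStepItem sel) (c, b, co)).1 =
        (items.flatMap (fun kv =>
          if kv.1 != "chain_of_thought_reasoning" && PySem.Set.contains (PySem.Set.ofList (sel.map PySem.Str.lower)) (PySem.Str.lower (pvStrip kv.1))
          then kv.2.map (fun cn => (pvStrip kv.1, pvStrip cn))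
          else [])).foldl pvGroupStep c := by
  induction items with
  | nil => intro c b co; rfl
  | cons kv rest ih =>
    intro c b co
    simp only [List.foldl_cons, List.flatMap_cons, List.foldl_append]
    by_cases hcot : kv.1 = "chain_of_thought_reasoning"
    · have hstep : pvAStepItem sel (c, b, co) kv = (c, b, some kv.2) := by
        simp [pvAStepItem, hcot]
      have hcond : (kv.1 != "chain_of_thought_reasoning") = false := by simp [hcot]
      rw [hstep, hcond, Bool.false_and, if_neg (by simp), List.foldl_nil]
      exact ih c b (some kv.2)
    · by_cases hsel : ((sel.map PySem.Str.lower).contains (PySem.Str.lower (pvStrip kv.1))) = true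
      · have hstep : pvAStepItem sel (c, b, co) kv =
            ((kv.2.foldl (pvAStepCol (pvStrip kv.1)) (c, b)).1,
             (kv.2.foldl (pvAStepCol (pvStrip kv.1)) (c, b)).2, co) := by
          simp only [pvAStepItem, pvStrip] at hsel ⊢
          rw [if_neg (by simp [hcot]), if_pos hsel]
        have hcond : (kv.1 != "chain_of_thought_reasoning" && PySem.Set.contains (PySem.Set.ofList (sel.map PySem.Str.lower)) (PySem.Str.lower (pvStrip kv.1))) = true := by
          rw [pv_set_contains_ofList, Bool.and_eq_true]
          exact ⟨by simp [hcot], hsel⟩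
        rw [hstep, hcond, if_pos rfl, ih, pv_colfold]
      · have hstep : pvAStepItem sel (c, b, co) kv = (c, b, co) := by
          simp only [pvAStepItem, pvStrip] at hsel ⊢
          rw [if_neg (by simp [hcot]), if_neg hsel]
        have hcond : (kv.1 != "chain_of_thought_reasoning" && PySem.Set.contains (PySem.Set.ofList (sel.map PySem.Str.lower)) (PySem.Str.lower (pvStrip kv.1))) = false := by
          rw [pv_set_contains_ofList, eq_false_of_ne_true hsel, Bool.and_false]
        rw [hstep, hcond, if_neg (by simp), List.foldl_nil]
        exact ih c b co

theorem pv_dictfold (sel : List String) (cds : List (List (String × List String))) :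
    ∀ (st : PySem.Dict String (List String) × List (List String)),
      (cds.foldl (pvAStepDict sel) st).1 =
        (pvPairsFlat cds sel).foldl pvGroupStep st.1 := by
  induction cds with
  | nil => intro st; rfl
  | cons d rest ih =>
    intro st
    simp only [List.foldl_cons, pvPairsFlat, List.flatMap_cons, List.foldl_append]
    rw [ih]
    simp only [pvPairsFlat, pvAStepDict]
    rw [pv_itemfold]

-- ---- B's event loops compute the same flattened pairs ----

theorem pv_evitem (sel : List String) (items : List (String × List String)) :
    ∀ (ev : List (String × String)),
      items.foldl (pvEvStepItem (PySem.Set.ofList (sel.map PySem.Str.lower))) ev =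
        ev ++ items.flatMap (fun kv =>
          if kv.1 != "chain_of_thought_reasoning" && PySem.Set.contains (PySem.Set.ofList (sel.map PySem.Str.lower)) (PySem.Str.lower (pvStrip kv.1))
          then kv.2.map (fun cn => (pvStrip kv.1, pvStrip cn))
          else []) := by
  induction items with
  | nil => intro ev; simp
  | cons kv rest ih =>
    intro ev
    simp only [List.foldl_cons, List.flatMap_cons]
    rw [ih, ← List.append_assoc]
    congr 1
    show pvEvStepItem _ ev kv = _
    by_cases hcot : kv.1 = "chain_of_thought_reasoning"
    · have h2 : (kv.1 != "chain_of_thought_reasoning") = false := by simp [hcot]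
      simp only [pvEvStepItem, h2, Bool.false_eq_true, if_false, Bool.false_and, List.append_nil]
    · have h2 : (kv.1 != "chain_of_thought_reasoning") = true := by simp [hcot]
      cases hsel : PySem.Set.contains (PySem.Set.ofList (sel.map PySem.Str.lower)) (PySem.Str.lower (pvStrip kv.1)) with
      | true =>
        simp only [pvEvStepItem, h2, hsel, Bool.true_and]
        simp
      | false =>
        simp only [pvEvStepItem, h2, hsel, Bool.true_and]
        simp

theorem pv_events_eq (sel : List String) (cds : List (List (String × List String))) :
    ∀ (ev : List (String × String)),
      cds.foldl (fun ev d => (PySem.Dict.ofList d).items.foldl (pvEvStepItem (PySem.Set.ofList (sel.map PySem.Str.lower))) ev) ev =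
        ev ++ pvPairsFlat cds sel := by
  induction cds with
  | nil => intro ev; simp [pvPairsFlat]
  | cons d rest ih =>
    intro ev
    simp only [List.foldl_cons, pvPairsFlat, List.flatMap_cons]
    rw [pv_evitem, ih]
    simp [pvPairsFlat]

-- ---- characterization of pvTables ----

theorem pv_tables_eq_ofList (ps : List (String × String)) :
    pvTables ps = PySem.Set.ofList (ps.map (fun p => p.1)) := by
  rw [pvTables, PySem.Set.ofList_eq_foldl, List.foldl_map]
  rfl

-- ---- snoc lemma for pvUniqCI ----

theorem pv_uniq_inv (cols : List String) :
    ∀ (st : PySem.Set String × List String),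
      (∀ x, PySem.Set.contains st.1 x = (st.2.map PySem.Str.lower).contains x) →
      ∀ x, PySem.Set.contains (cols.foldl pvUniqStep st).1 x = ((cols.foldl pvUniqStep st).2.map PySem.Str.lower).contains x := by
  induction cols with
  | nil => intro st h; exact h
  | cons c rest ih =>
    intro st h
    simp only [List.foldl_cons]
    apply ih
    intro x
    by_cases hc : PySem.Set.contains st.1 (PySem.Str.lower c) = true
    · simp only [pvUniqStep, hc]
      exact h x
    · simp only [pvUniqStep, hc, Bool.false_eq_true, if_false]
      simp only [List.map_append, List.map_cons, List.map_nil, List.contains_append]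
      rw [← h x]
      by_cases hx : x = PySem.Str.lower c
      · subst hx
        simp [PySem.Set.contains_eq_listContains, PySem.Set.mem_add]
      · have : PySem.Set.contains (PySem.Set.add st.1 (PySem.Str.lower c)) x = PySem.Set.contains st.1 x := by
          simp only [PySem.Set.contains_eq_listContains]
          simp [PySem.Set.mem_add, hx]
        rw [this]
        simp [hx]

theorem pvUniqCI_snoc (cols : List String) (c : String) :
    pvUniqCI (cols ++ [c]) =
      if ((pvUniqCI cols).map PySem.Str.lower).contains (PySem.Str.lower c)
      then pvUniqCI cols else pvUniqCI cols ++ [c] := by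
  have hinv := pv_uniq_inv cols (PySem.Set.empty, []) (fun x => rfl) (PySem.Str.lower c)
  simp only [pvUniqCI, List.foldl_append, List.foldl_cons, List.foldl_nil]
  rw [← hinv]
  unfold pvUniqStep
  split_ifs with h
  · rfl
  · rfl

-- ---- the main group-by characterization ----

theorem pv_group_items (ps : List (String × String)) :
    (ps.foldl pvGroupStep PySem.Dict.empty).items = (pvTables ps).map (pvEntry ps) := by
  induction ps using List.reverseRecOn with
  | nil => rfl
  | append_singleton ps p ih =>
    obtain ⟨t, c⟩ := p
    rw [List.foldl_append, List.foldl_cons, List.foldl_nil]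
    set d := ps.foldl pvGroupStep PySem.Dict.empty with hd
    have hT : pvTables ps = PySem.Set.ofList (ps.map (fun p => p.1)) := pv_tables_eq_ofList ps
    have hTnew : pvTables (ps ++ [(t, c)]) =
        PySem.Set.add (PySem.Set.ofList (ps.map (fun p => p.1))) t := by
      rw [pv_tables_eq_ofList]
      simp only [List.map_append, List.map_cons, List.map_nil]
      rw [PySem.Set.ofList_eq_foldl, PySem.Set.ofList_eq_foldl, List.foldl_append, List.foldl_cons, List.foldl_nil]
    have hTnd : (pvTables ps).Nodup := by rw [hT]; exact PySem.Set.nodup_ofList _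
    have hkeys : d.keys = pvTables ps := by
      show d.items.map (fun p => p.1) = _
      rw [ih, List.map_map]
      have : ((fun p => p.1) ∘ pvEntry ps) = id := by funext x; rfl
      rw [this, List.map_id]
    have hknd : d.keys.Nodup := by rw [hkeys]; exact hTnd
    -- filter over the snoc
    have hfilt : ∀ t' : String, ((ps ++ [(t, c)]).filter (fun p => p.1 == t')) =
        ps.filter (fun p => p.1 == t') ++ (if t == t' then [(t, c)] else []) := by
      intro t'
      rw [List.filter_append]
      congr 1
      cases hb : (t == t') with
      | true => simp [hb]
      | false => simp [hb]
    by_cases hmem : t ∈ pvTables ps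
    · -- existing table
      have hcont : d.contains t = true := by
        rw [PySem.Dict.contains_eq_decide_mem_keys, hkeys]
        simp [hmem]
      have hTsame : pvTables (ps ++ [(t, c)]) = pvTables ps := by
        rw [hTnew, ← hT]
        simp only [PySem.Set.add]
        rw [if_pos]
        simpa [PySem.Set.contains_eq_listContains] using hmem
      have hgetD : d.getD t [] = pvUniqCI ((ps.filter (fun p => p.1 == t)).map (fun p => p.2)) := by
        apply PySem.Dict.getD_of_mem_items
        · rw [ih]
          exact List.mem_map.mpr ⟨t, hmem, rfl⟩
        · exact hknd
      have hent_ne : ∀ t' ∈ pvTables ps, t' ≠ t → pvEntry (ps ++ [(t, c)]) t' = pvEntry ps t' := by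
        intro t' _ hne
        simp only [pvEntry, hfilt t']
        rw [if_neg (by simp [Ne.symm hne])]
        simp
      have hsd : d.setdefault t [] = d := PySem.Dict.setdefault_of_contains d _ hcont
      simp only [pvGroupStep, hsd, hgetD]
      set old := pvUniqCI ((ps.filter (fun p => p.1 == t)).map (fun p => p.2)) with hold
      have hentt : pvEntry (ps ++ [(t, c)]) t =
          (t, if (old.map PySem.Str.lower).contains (PySem.Str.lower c) then old else old ++ [c]) := by
        simp only [pvEntry, hfilt t]
        rw [if_pos (by simp)]
        simp only [List.map_append, List.map_cons, List.map_nil]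
        rw [pvUniqCI_snoc]
      by_cases hdup : ((old.map PySem.Str.lower).contains (PySem.Str.lower c)) = true
      · rw [if_pos hdup, ih, hTsame]
        apply List.map_congr_left
        intro t' ht'
        by_cases he : t' = t
        · subst he
          rw [hentt, if_pos hdup]
          rfl
        · exact (hent_ne t' ht' he).symm
      · rw [if_neg hdup, PySem.Dict.items_insert_of_contains d _ hcont, ih, hTsame, List.map_map]
        apply List.map_congr_left
        intro t' ht'
        simp only [Function.comp_apply]
        by_cases he : t' = t
        · subst he
          have hb : ((pvEntry ps t').1 == t') = true := by simp [pvEntry]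
          rw [hb, if_pos rfl, hentt, if_neg hdup]
        · have hb : ((pvEntry ps t').1 == t) = false := by simp [pvEntry, he]
          rw [hb]
          simp only [Bool.false_eq_true, if_false]
          exact (hent_ne t' ht' he).symm
    · -- new table
      have hcont : d.contains t = false := by
        rw [PySem.Dict.contains_eq_decide_mem_keys, hkeys]
        simp [hmem]
      have hTapp : pvTables (ps ++ [(t, c)]) = pvTables ps ++ [t] := by
        rw [hTnew, ← hT]
        simp only [PySem.Set.add]
        rw [if_neg]
        simp only [PySem.Set.contains_eq_listContains]
        simpa using hmem
      have hnops : (ps.filter (fun p => p.1 == t)) = [] := by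
        rw [List.filter_eq_nil_iff]
        intro p hp hpt
        apply hmem
        rw [hT, PySem.Set.mem_ofList]
        exact List.mem_map.mpr ⟨p, hp, by simpa using hpt⟩
      have hd' : pvGroupStep d (t, c) = d.insert t [c] := by
        simp only [pvGroupStep, PySem.Dict.setdefault_of_not_contains d _ hcont]
        rw [PySem.Dict.getD_insert_self]
        simp [PySem.Dict.insert_insert_self]
      rw [hd', PySem.Dict.items_insert_of_not_contains d _ hcont, ih, hTapp, List.map_append]
      congr 1
      · apply List.map_congr_left
        intro t' ht'
        have hne : t' ≠ t := fun h => hmem (h ▸ ht')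
        simp only [pvEntry, hfilt t']
        rw [if_neg (by simp [Ne.symm hne])]
        simp
      · simp only [List.map_cons, List.map_nil, pvEntry, hfilt t]
        rw [hnops, if_pos (by simp)]
        rfl

-- ===== VERDICT (by name: the statement is the Claim_ definition above) =====
theorem aggregate_columns_spec : Claim_equal_aggregate_columns := by
  intro cds sel mc qid _
  unfold Spec_aggregate_columns aggregate_columns aggregate_columns_alt
  rw [pv_dictfold]
  simp only [pvEvents]
  rw [pv_events_eq]
  simp only [List.nil_append]
  rw [pv_group_items]
  rfl
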